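-- pv_equiv track=rewrite | github.com/vrrohan/Topcoder | easy/day10/srm655/bichromeboard.py | ableToDraw
-- ===== SOURCE A (Python) =====
-- def ableToDraw(board) :
--     isBichromeBoardPossible = "Possible"
--     if (len(board)>=1) :
--         for i in board :
--             rowString = str(i)
--             firstIndexofWhite = rowString.index('W') if ('W' in rowString) else -1
--             firstIndexofBlack = rowString.index('B') if ('B' in rowString) else -1
--             #when white color is at even position
--             if (firstIndexofWhite>=0 and firstIndexofWhite%2==0) :
--                 #check if any even contains black
--                 for ch in range(0, len(rowString), 2) :
--                     if rowString[ch]=='B' :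
--                         isBichromeBoardPossible = "Impossible"
--                         break
--                 #check if any odd contains white
--                 for ch in range(1, len(rowString), 2) :
--                     if rowString[ch]=='W' :
--                         isBichromeBoardPossible = "Impossible"
--                         break
--             #when white color is at odd position
--             elif (firstIndexofWhite>=0 and firstIndexofWhite%2==1) :
--                 #check if any odd contains black
--                 for ch in range(1, len(rowString), 2) :
--                     if rowString[ch]=='B' :
--                         isBichromeBoardPossible = "Impossible"
--                         break
--                 #check if any even contains white
--                 for ch in range(0, len(rowString), 2) :
--                     if rowString[ch]=='W' :
--                         isBichromeBoardPossible = "Impossible"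
--                         break
--             #when black color is at even position
--             if (firstIndexofBlack>=0 and firstIndexofBlack%2==0) :
--                  #check if any even contains white
--                  for ch in range(0, len(rowString), 2) :
--                      if rowString[ch]=='W' :
--                          isBichromeBoardPossible = "Impossible"
--                          break
--                  for ch in range(1, len(rowString), 2) :
--                      if rowString[ch]=='B' :
--                         isBichromeBoardPossible = "Impossible"
--                         break
--             #when black color is at odd position
--             elif (firstIndexofBlack>=0 and firstIndexofBlack%2==1) :
--                 #check if any odd contains white
--                 for ch in range(1, len(rowString), 2) :
--                     if rowString[ch]=='W' :
--                         isBichromeBoardPossible = "Impossible"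
--                         break
--                 for ch in range(0, len(rowString), 2) :
--                     if rowString[ch]=='B' :
--                         isBichromeBoardPossible = "Impossible"
--                         break
--     return isBichromeBoardPossible
-- ===== SOURCE B (Python) =====
-- def ableToDraw(board):
--     for row in board:
--         s = str(row)
--         we = wo = be = bo = False
--         for i, c in enumerate(s):
--             if c == 'W':
--                 if i % 2:
--                     wo = True
--                 else:
--                     we = True
--             elif c == 'B':
--                 if i % 2:
--                     bo = True
--                 else:
--                     be = True
--         if (we or bo) and (wo or be):
--             return "Impossible"
--     return "Possible"
-- ===== Notes on version B (the rewrite author's own statement) =====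
-- stated objective: simpler
-- what changed: A detects the row's phase from the first 'W'/'B' occurrence and then re-scans even and odd positions up to four times per row with a sticky flag; B makes a single enumerate pass per row collecting four parity flags (W-at-even, W-at-odd, B-at-even, B-at-odd) and returns 'Impossible' at the first row where (we or bo) and (wo or be).
import Mathlib
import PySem

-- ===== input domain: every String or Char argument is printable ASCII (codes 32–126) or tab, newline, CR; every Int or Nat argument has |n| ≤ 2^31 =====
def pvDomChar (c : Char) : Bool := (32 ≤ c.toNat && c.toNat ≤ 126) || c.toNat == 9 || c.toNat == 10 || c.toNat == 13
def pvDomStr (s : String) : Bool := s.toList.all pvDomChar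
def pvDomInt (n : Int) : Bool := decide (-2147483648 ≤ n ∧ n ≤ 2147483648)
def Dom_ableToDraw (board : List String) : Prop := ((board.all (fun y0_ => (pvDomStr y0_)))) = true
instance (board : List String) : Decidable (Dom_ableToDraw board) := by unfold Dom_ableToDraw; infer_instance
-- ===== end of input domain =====

-- B replaces A's first-occurrence phase detection and four strided re-scans per row with a
-- single pass per row collecting four parity flags (objective: simpler, one pass per row).

-- ===== PORT A =====
-- inner loop 'for ch in range(r, len(rowString), 2): if rowString[ch] == c: flag = "Impossible"; break'
def pvScanLoop (s : String) (c : Char) (flag : String) : List Int → String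
  | [] => flag
  | i :: rest =>
    if PySem.Str.pyGet? s i = some c then "Impossible" else pvScanLoop s c flag rest

-- body of A's 'for i in board' loop (str(i) on a str is the identity)
def pvRowStep (flag : String) (rowString : String) : String :=
  let fw : Int := if PySem.Str.isIn "W" rowString then PySem.Str.find rowString "W" else -1
  let fb : Int := if PySem.Str.isIn "B" rowString then PySem.Str.find rowString "B" else -1
  let n : Int := PySem.Str.len rowString
  let flag1 :=
    if 0 ≤ fw ∧ PySem.Int.mod fw 2 = 0 then
      pvScanLoop rowString 'W' (pvScanLoop rowString 'B' flag (PySem.List.pyRange 0 n 2)) (PySem.List.pyRange 1 n 2)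
    else if 0 ≤ fw ∧ PySem.Int.mod fw 2 = 1 then
      pvScanLoop rowString 'W' (pvScanLoop rowString 'B' flag (PySem.List.pyRange 1 n 2)) (PySem.List.pyRange 0 n 2)
    else flag
  if 0 ≤ fb ∧ PySem.Int.mod fb 2 = 0 then
    pvScanLoop rowString 'B' (pvScanLoop rowString 'W' flag1 (PySem.List.pyRange 0 n 2)) (PySem.List.pyRange 1 n 2)
  else if 0 ≤ fb ∧ PySem.Int.mod fb 2 = 1 then
    pvScanLoop rowString 'B' (pvScanLoop rowString 'W' flag1 (PySem.List.pyRange 1 n 2)) (PySem.List.pyRange 0 n 2)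
  else flag1

def ableToDraw (board : List String) : String :=
  let flag := "Possible"
  if board.length ≥ 1 then board.foldl pvRowStep flag else flag

-- ===== PORT B =====
-- one pass over 'enumerate(s)' collecting (we, wo, be, bo)
def pvFlagStep (st : Bool × Bool × Bool × Bool) (p : Int × Char) : Bool × Bool × Bool × Bool :=
  if p.2 = 'W' then
    (if PySem.Int.mod p.1 2 ≠ 0 then (st.1, true, st.2.2.1, st.2.2.2)
     else (true, st.2.1, st.2.2.1, st.2.2.2))
  else if p.2 = 'B' then
    (if PySem.Int.mod p.1 2 ≠ 0 then (st.1, st.2.1, st.2.2.1, true)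
     else (st.1, st.2.1, true, st.2.2.2))
  else st

def pvRowFlags (s : String) : Bool × Bool × Bool × Bool :=
  (PySem.List.enumerate s.toList).foldl pvFlagStep (false, false, false, false)

def ableToDraw_alt : List String → String
  | [] => "Possible"
  | row :: rest =>
    let st := pvRowFlags row
    if (st.1 || st.2.2.2) && (st.2.1 || st.2.2.1) then "Impossible" else ableToDraw_alt rest

-- ===== PRECONDITION & SPEC =====
def Spec_ableToDraw (board : List String) (out : String) : Prop := out = ableToDraw_alt board
instance (board : List String) (out : String) : Decidable (Spec_ableToDraw board out) := by unfold Spec_ableToDraw; infer_instance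

-- ===== CLAIM (what is proved, stated in full; the proofs are below) =====
def Claim_equal_ableToDraw : Prop := ∀ (board : List String), Dom_ableToDraw board → Spec_ableToDraw board (ableToDraw board)

-- ===== LEMMAS AND PROOFS =====

-- '∃ k, (s0+k) % 2 = r ∧ l[k] = c' as a Bool
def pvExA (l : List Char) (s0 r : Nat) (c : Char) : Bool :=
  (List.range l.length).any (fun k => (s0 + k) % 2 == r && l[k]? == some c)

def pvBadRow (l : List Char) : Bool :=
  (pvExA l 0 0 'W' || pvExA l 0 1 'B') && (pvExA l 0 1 'W' || pvExA l 0 0 'B')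

theorem pvExA_iff (l : List Char) (s0 r : Nat) (c : Char) :
    pvExA l s0 r c = true ↔ ∃ k, (s0 + k) % 2 = r ∧ l[k]? = some c := by
  simp only [pvExA, List.any_eq_true, List.mem_range, Bool.and_eq_true, beq_iff_eq]
  constructor
  · rintro ⟨k, _, h1, h2⟩; exact ⟨k, h1, h2⟩
  · rintro ⟨k, h1, h2⟩
    obtain ⟨hlt, -⟩ := List.getElem?_eq_some_iff.mp h2
    exact ⟨k, hlt, h1, h2⟩

theorem pvExA_cons (x : Char) (l : List Char) (s0 r : Nat) (c : Char) :
    pvExA (x :: l) s0 r c = (((s0 % 2 == r) && (x == c)) || pvExA l (s0 + 1) r c) := by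
  rw [Bool.eq_iff_iff]
  simp only [pvExA_iff, Bool.or_eq_true, Bool.and_eq_true, beq_iff_eq]
  constructor
  · rintro ⟨k, h1, h2⟩
    cases k with
    | zero => exact Or.inl ⟨by simpa using h1, by simpa using h2⟩
    | succ k => exact Or.inr ⟨k, by omega, by simpa using h2⟩
  · rintro (⟨h1, h2⟩ | ⟨k, h1, h2⟩)
    · exact ⟨0, by simpa using h1, by simpa using h2⟩
    · exact ⟨k + 1, by omega, by simpa using h2⟩

theorem pvMod_natCast (k : Nat) : PySem.Int.mod (k : Int) 2 = ((k % 2 : Nat) : Int) := by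
  simp [PySem.Int.mod, Int.fmod_eq_emod]

-- pvScanLoop is 'Impossible if any listed index holds c, else the incoming flag'
theorem pvScanLoop_eq (s : String) (c : Char) (flag : String) (idxs : List Int) :
    pvScanLoop s c flag idxs =
      if idxs.any (fun i => PySem.Str.pyGet? s i == some c) then "Impossible" else flag := by
  induction idxs with
  | nil => simp [pvScanLoop]
  | cons i rest ih =>
    simp only [pvScanLoop, List.any_cons, ih]
    by_cases h : PySem.List.pyGet? s.toList i = some c <;> simp [h]

-- the strided range scan tests exactly 'some index of parity r holds c'
theorem pvAnyRange (s : String) (c : Char) (r : Nat) (hr : r < 2) :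
    ((PySem.List.pyRange r (PySem.Str.len s) 2).any (fun i => PySem.Str.pyGet? s i == some c))
      = pvExA s.toList 0 r c := by
  rw [Bool.eq_iff_iff]
  simp only [List.any_eq_true, beq_iff_eq, pvExA_iff, Nat.zero_add]
  constructor
  · rintro ⟨x, hx, hget⟩
    rw [PySem.List.mem_pyRange_iff_of_pos (by norm_num)] at hx
    obtain ⟨h1, h2, h3⟩ := hx
    have hx0 : 0 ≤ x := le_trans (by exact_mod_cast Nat.zero_le r) h1
    have hx : PySem.Str.pyGet? s ((x.toNat : Nat) : Int) = some c := by
      rw [show ((x.toNat : Nat) : Int) = x by omega]; exact hget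
    rw [PySem.Str.pyGet?_natCast] at hx
    exact ⟨x.toNat, by omega, hx⟩
  · rintro ⟨k, hk1, hk2⟩
    obtain ⟨hlt, -⟩ := List.getElem?_eq_some_iff.mp hk2
    refine ⟨(k : Int), ?_, by rw [PySem.Str.pyGet?_natCast]; exact hk2⟩
    rw [PySem.List.mem_pyRange_iff_of_pos (by norm_num), PySem.Str.len_eq]
    refine ⟨by omega, by exact_mod_cast hlt, by omega⟩

-- membership of the single character c in the row ↔ one of the two parity flags
theorem pvIsIn_single (s : String) (c : Char) (cs : String) (hc : cs.toList = [c]) :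
    PySem.Str.isIn cs s = (pvExA s.toList 0 0 c || pvExA s.toList 0 1 c) := by
  rw [Bool.eq_iff_iff, PySem.Str.isIn_eq, hc, PySem.Chars.isIn_iff_infix,
    List.singleton_infix_iff, List.mem_iff_getElem?]
  simp only [Bool.or_eq_true, pvExA_iff, Nat.zero_add]
  constructor
  · rintro ⟨k, hk⟩
    rcases Nat.mod_two_eq_zero_or_one k with h | h
    · exact Or.inl ⟨k, h, hk⟩
    · exact Or.inr ⟨k, h, hk⟩
  · rintro (⟨k, _, hk⟩ | ⟨k, _, hk⟩) <;> exact ⟨k, hk⟩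

-- the character at the found index is c
theorem pvFind_char (s : String) (c : Char) (cs : String) (hc : cs.toList = [c])
    (h : 0 ≤ PySem.Str.find s cs) :
    s.toList[(PySem.Str.find s cs).toNat]? = some c := by
  rw [PySem.Str.find_eq, hc] at *
  have := (PySem.Chars.find_spec h).1
  rw [List.cons_prefix_iff] at this
  obtain ⟨l', hl', -⟩ := this
  rw [← List.head?_drop, hl']; rfl

theorem pvAnyRange0 (s : String) (c : Char) :
    ((PySem.List.pyRange 0 (PySem.Str.len s) 2).any (fun i => PySem.Str.pyGet? s i == some c))
      = pvExA s.toList 0 0 c := by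
  have h := pvAnyRange s c 0 (by norm_num)
  simpa using h

theorem pvAnyRange1 (s : String) (c : Char) :
    ((PySem.List.pyRange 1 (PySem.Str.len s) 2).any (fun i => PySem.Str.pyGet? s i == some c))
      = pvExA s.toList 0 1 c := by
  have h := pvAnyRange s c 1 (by norm_num)
  simpa using h

-- one colour block of A ('c' the colour whose first index steers, 'o' the other colour)
theorem pvBlock_eq (s : String) (c o : Char) (cs : String) (hc : cs.toList = [c])
    (flag : String) :
    (if 0 ≤ (if PySem.Str.isIn cs s then PySem.Str.find s cs else -1) ∧
        PySem.Int.mod (if PySem.Str.isIn cs s then PySem.Str.find s cs else -1) 2 = 0 then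
       pvScanLoop s c (pvScanLoop s o flag (PySem.List.pyRange 0 (PySem.Str.len s) 2)) (PySem.List.pyRange 1 (PySem.Str.len s) 2)
     else if 0 ≤ (if PySem.Str.isIn cs s then PySem.Str.find s cs else -1) ∧
        PySem.Int.mod (if PySem.Str.isIn cs s then PySem.Str.find s cs else -1) 2 = 1 then
       pvScanLoop s c (pvScanLoop s o flag (PySem.List.pyRange 1 (PySem.Str.len s) 2)) (PySem.List.pyRange 0 (PySem.Str.len s) 2)
     else flag)
    = if (pvExA s.toList 0 0 c && pvExA s.toList 0 1 c)
        || (pvExA s.toList 0 0 c && pvExA s.toList 0 0 o)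
        || (pvExA s.toList 0 1 c && pvExA s.toList 0 1 o) then "Impossible" else flag := by
  simp only [pvScanLoop_eq]
  rw [pvAnyRange0 s c, pvAnyRange1 s c, pvAnyRange0 s o, pvAnyRange1 s o]
  by_cases hce : pvExA s.toList 0 0 c = true <;> by_cases hco : pvExA s.toList 0 1 c = true
  · -- both parities have c: whichever branch runs ends "Impossible"
    have hin : PySem.Str.isIn cs s = true := by rw [pvIsIn_single s c cs hc, hce]; simp
    have hf : 0 ≤ PySem.Str.find s cs := by
      rw [PySem.Str.find_eq, PySem.Chars.find_nonneg_iff]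
      rw [PySem.Str.isIn_eq, PySem.Chars.isIn_iff_infix] at hin; exact hin
    rw [if_pos hin]
    rcases PySem.Int.mod_two_eq (PySem.Str.find s cs) with hm | hm
    · rw [if_pos ⟨hf, hm⟩, if_pos hco]; simp [hce, hco]
    · rw [if_neg (by rintro ⟨-, h0⟩; rw [h0] at hm; exact absurd hm (by norm_num)),
        if_pos ⟨hf, hm⟩, if_pos hce]
      simp [hce, hco]
  · -- c only at even indices: the found index is even
    have hin : PySem.Str.isIn cs s = true := by rw [pvIsIn_single s c cs hc, hce]; simp
    have hf : 0 ≤ PySem.Str.find s cs := by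
      rw [PySem.Str.find_eq, PySem.Chars.find_nonneg_iff]
      rw [PySem.Str.isIn_eq, PySem.Chars.isIn_iff_infix] at hin; exact hin
    have hat := pvFind_char s c cs hc hf
    have hpar : (PySem.Str.find s cs).toNat % 2 = 0 := by
      rcases Nat.mod_two_eq_zero_or_one (PySem.Str.find s cs).toNat with h | h
      · exact h
      · exact absurd ((pvExA_iff _ _ _ _).mpr ⟨(PySem.Str.find s cs).toNat, by omega, hat⟩) hco
    have hm : PySem.Int.mod (PySem.Str.find s cs) 2 = 0 := by
      rw [show PySem.Str.find s cs = (((PySem.Str.find s cs).toNat : Nat) : Int) by omega,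
        pvMod_natCast, hpar]; rfl
    rw [if_pos hin, if_pos ⟨hf, hm⟩, if_neg hco]
    by_cases ho : pvExA s.toList 0 0 o = true <;> simp [hce, hco, ho]
  · -- c only at odd indices: the found index is odd
    have hin : PySem.Str.isIn cs s = true := by rw [pvIsIn_single s c cs hc, hco]; simp
    have hf : 0 ≤ PySem.Str.find s cs := by
      rw [PySem.Str.find_eq, PySem.Chars.find_nonneg_iff]
      rw [PySem.Str.isIn_eq, PySem.Chars.isIn_iff_infix] at hin; exact hin
    have hat := pvFind_char s c cs hc hf
    have hpar : (PySem.Str.find s cs).toNat % 2 = 1 := by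
      rcases Nat.mod_two_eq_zero_or_one (PySem.Str.find s cs).toNat with h | h
      · exact absurd ((pvExA_iff _ _ _ _).mpr ⟨(PySem.Str.find s cs).toNat, by omega, hat⟩) hce
      · exact h
    have hm : PySem.Int.mod (PySem.Str.find s cs) 2 = 1 := by
      rw [show PySem.Str.find s cs = (((PySem.Str.find s cs).toNat : Nat) : Int) by omega,
        pvMod_natCast, hpar]; rfl
    rw [if_pos hin,
      if_neg (by rintro ⟨-, h0⟩; rw [h0] at hm; exact absurd hm (by norm_num)),
      if_pos ⟨hf, hm⟩, if_neg hce]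
    by_cases ho : pvExA s.toList 0 1 o = true <;> simp [hce, hco, ho]
  · -- c absent: first index is -1, both branches skipped
    have hin : PySem.Str.isIn cs s = false := by
      rw [pvIsIn_single s c cs hc]; simp [hce, hco]
    have hfeq : (if PySem.Str.isIn cs s = true then PySem.Str.find s cs else -1) = (-1 : Int) :=
      if_neg (by rw [PySem.Str.isIn_eq] at hin; simp [hin])
    rw [hfeq, if_neg (by rintro ⟨h0, -⟩; exact absurd h0 (by norm_num)),
      if_neg (by rintro ⟨h0, -⟩; exact absurd h0 (by norm_num))]
    simp [hce, hco]

-- A's per-row effect on the flag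
theorem pvRowStep_eq (flag : String) (row : String) :
    pvRowStep flag row = if pvBadRow row.toList then "Impossible" else flag := by
  have hW := pvBlock_eq row 'W' 'B' "W" rfl flag
  have hB := pvBlock_eq row 'B' 'W' "B" rfl
  simp only [pvRowStep]
  rw [hW, hB]
  simp only [pvBadRow]
  by_cases hwe : pvExA row.toList 0 0 'W' = true <;> by_cases hwo : pvExA row.toList 0 1 'W' = true <;>
    by_cases hbe : pvExA row.toList 0 0 'B' = true <;> by_cases hbo : pvExA row.toList 0 1 'B' = true <;>
    simp [hwe, hwo, hbe, hbo]

-- B's per-row flags are exactly the four parity-existence booleans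
theorem pvFoldFlags (l : List Char) (s0 : Nat) (we wo be bo : Bool) :
    (PySem.List.enumerate l (s0 : Int)).foldl pvFlagStep (we, wo, be, bo)
      = (we || pvExA l s0 0 'W', wo || pvExA l s0 1 'W', be || pvExA l s0 0 'B', bo || pvExA l s0 1 'B') := by
  induction l generalizing s0 we wo be bo with
  | nil => simp [pvExA, PySem.List.enumerate]
  | cons x t ih =>
    rw [PySem.List.enumerate_cons, List.foldl_cons,
      show ((s0 : Int) + 1) = ((s0 + 1 : Nat) : Int) by push_cast; ring]
    simp only [pvExA_cons]
    rcases Nat.mod_two_eq_zero_or_one s0 with hp | hp <;>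
      by_cases hxW : x = 'W' <;> by_cases hxB : x = 'B'
    all_goals first
    | exact absurd (hxW ▸ hxB) (by decide)
    | (generalize (s0 + 1 : Nat) = s1
       have hi : ((s0 : Int)) % 2 = 1 ↔ s0 % 2 = 1 := by omega
       simp [pvFlagStep, hxW, hxB, hi, hp, ih]
       done)
    | (generalize (s0 + 1 : Nat) = s1
       have hi : ((s0 : Int)) % 2 = 1 ↔ s0 % 2 = 1 := by omega
       have hw : (x == 'W') = false := beq_false_of_ne hxW
       have hb : (x == 'B') = false := beq_false_of_ne hxB
       simp [pvFlagStep, hxW, hxB, hp, ih, hw, hb])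

theorem pvRowFlags_eq (s : String) :
    pvRowFlags s = (pvExA s.toList 0 0 'W', pvExA s.toList 0 1 'W', pvExA s.toList 0 0 'B', pvExA s.toList 0 1 'B') := by
  have := pvFoldFlags s.toList 0 false false false false
  simpa [pvRowFlags] using this

-- both programs reduce to 'some bad row exists'
theorem pvFoldA (rows : List String) (flag : String) :
    rows.foldl pvRowStep flag = if rows.any (fun r => pvBadRow r.toList) then "Impossible" else flag := by
  induction rows generalizing flag with
  | nil => simp
  | cons r rest ih =>
    rw [List.foldl_cons, ih, pvRowStep_eq, List.any_cons]
    by_cases h : pvBadRow r.toList = true <;> simp [h]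

theorem pvAltEq (rows : List String) :
    ableToDraw_alt rows = if rows.any (fun r => pvBadRow r.toList) then "Impossible" else "Possible" := by
  induction rows with
  | nil => simp [ableToDraw_alt]
  | cons r rest ih =>
    rw [ableToDraw_alt, pvRowFlags_eq]
    simp only [List.any_cons]
    by_cases h : pvBadRow r.toList = true
    · simp only [pvBadRow] at h; simp [h, pvBadRow]
    · simp only [pvBadRow] at h
      simp only [pvBadRow, Bool.and_eq_true, Bool.or_eq_true] at *
      rw [if_neg (by simpa [pvBadRow] using h)]
      simp only [ih]
      by_cases h2 : rest.any (fun r => pvBadRow r.toList) = true <;> simp [h2, h]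

-- ===== VERDICT (by name: the statement is the Claim_ definition above) =====
theorem ableToDraw_spec : Claim_equal_ableToDraw := by
  intro board _
  unfold Spec_ableToDraw ableToDraw
  cases board with
  | nil => rfl
  | cons r rest =>
    simp only [List.length_cons, ge_iff_le, Nat.le_add_left, if_true, pvFoldA, pvAltEq]
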